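-- pv_equiv track=rewrite | github.com/pypi-data/pypi-mirror-303 | packages/biodata/biodata-0.1.5-py3-none-any.whl/biodata/baseio.py | get_text_file_extension
-- ===== SOURCE A (Python) =====
-- def get_text_file_extension(filename, neglect_zip=True):
-- 	'''
-- 	Neglect the zip extension and return file extension 'txt', 'csv', etc.
--
-- 	Only neglect one level of zip extension. "file.gz.bz2" will return 'gz'
--
-- 	:param filename: The file name
--
-- 	:returns: The file extension after decompression
--
-- 	Example usage:
--
-- 	.. code-block:: python
--
-- 		get_text_file_extension("a.txt") # 'txt'
--
-- 		get_text_file_extension("a.txt.gz") # 'txt'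
--
-- 		get_text_file_extension("a.csv.bz2") # 'csv'
--
-- 		get_text_file_extension("a.txt.gz", neglect_zip = False) # 'gz'
--
-- 		get_text_file_extension("example") # ''
--
-- 		get_text_file_extension("a.csv.txt") # 'txt'
-- 	'''
-- 	supported_zip_extensions = [".gz", ".bz2", ".bgz"]
-- 	if (neglect_zip):
-- 		for supported_zip_extension in supported_zip_extensions:
-- 			if filename.endswith(supported_zip_extension):
-- 				filename = filename[0:filename.rfind(supported_zip_extension)]
-- 				break
--
-- 	index = filename.rfind(".")
-- 	if index == -1: # No file extension found
-- 		return ""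
-- 	else:
-- 		return filename[index+1:]
-- ===== SOURCE B (Python) =====
-- def get_text_file_extension(filename, neglect_zip=True):
-- 	parts = filename.split(".")
-- 	if neglect_zip and len(parts) > 1 and parts[-1] in ("gz", "bz2", "bgz"):
-- 		parts.pop()
-- 	return parts[-1] if len(parts) > 1 else ""
-- ===== Notes on version B (the rewrite author's own statement) =====
-- stated objective: simpler
-- what changed: Splits the filename into its dot-delimited segments once and works on that list (pop the last segment when it is a compression suffix, answer by segment count and last segment) instead of A's endswith-loop with rfind index arithmetic on the raw string.
import Mathlib
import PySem

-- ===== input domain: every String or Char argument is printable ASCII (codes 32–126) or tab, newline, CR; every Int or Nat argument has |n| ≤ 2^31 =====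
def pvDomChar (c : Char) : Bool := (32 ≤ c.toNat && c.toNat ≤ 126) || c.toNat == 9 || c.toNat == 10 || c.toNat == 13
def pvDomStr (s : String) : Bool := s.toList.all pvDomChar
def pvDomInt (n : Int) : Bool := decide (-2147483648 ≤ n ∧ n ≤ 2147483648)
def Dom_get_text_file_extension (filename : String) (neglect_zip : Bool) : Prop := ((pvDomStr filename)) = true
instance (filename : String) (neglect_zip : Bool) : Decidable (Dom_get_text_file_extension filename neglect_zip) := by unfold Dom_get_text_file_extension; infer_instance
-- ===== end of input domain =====

-- ===== PORT A =====
-- B splits the filename into dot-delimited segments once and decides by segment count / last segment,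
-- instead of A's endswith-loop + rfind index arithmetic (objective: simpler).
-- for-loop over the zip extensions (with break), transcribed as structural recursion over the list
def pvStripZip (fn : String) : List String → String
  | [] => fn
  | e :: rest =>
      if PySem.Str.endswith fn e then
        PySem.Str.slice fn (some 0) (some (PySem.Str.rfind fn e))
      else pvStripZip fn rest

def get_text_file_extension (filename : String) (neglect_zip : Bool) : String :=
  let supported_zip_extensions := [".gz", ".bz2", ".bgz"]
  let filename := if neglect_zip then pvStripZip filename supported_zip_extensions else filename
  let index := PySem.Str.rfind filename "."
  if index = -1 then "" else PySem.Str.slice filename (some (index + 1)) none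

-- ===== PORT B =====
-- filename.split(".") — a library call of Source B, ported as Mathlib's List.splitOn on the code points
-- (same semantics for a one-character separator: empty segments kept, "" ↦ [""]).
def get_text_file_extension_alt (filename : String) (neglect_zip : Bool) : String :=
  let parts := List.splitOn '.' filename.toList
  let parts :=
    if neglect_zip = true ∧ 1 < parts.length ∧
        (parts.getLastD [] = "gz".toList ∨ parts.getLastD [] = "bz2".toList ∨
         parts.getLastD [] = "bgz".toList)
    then parts.dropLast  -- parts.pop()
    else parts
  if 1 < parts.length then String.ofList (parts.getLastD []) else ""

-- ===== PRECONDITION & SPEC =====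
def Spec_get_text_file_extension (filename : String) (neglect_zip : Bool) (out : String) : Prop := out = get_text_file_extension_alt filename neglect_zip
instance (filename : String) (neglect_zip : Bool) (out : String) : Decidable (Spec_get_text_file_extension filename neglect_zip out) := by unfold Spec_get_text_file_extension; infer_instance

-- ===== CLAIM (what is proved, stated in full; the proofs are below) =====
def Claim_equal_get_text_file_extension : Prop := ∀ (filename : String) (neglect_zip : Bool), Dom_get_text_file_extension filename neglect_zip → Spec_get_text_file_extension filename neglect_zip (get_text_file_extension filename neglect_zip)

-- ===== LEMMAS AND PROOFS =====

-- the common tail of both programs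
def pvTailA (s : String) : String :=
  if PySem.Str.rfind s "." = -1 then ""
  else PySem.Str.slice s (some (PySem.Str.rfind s "." + 1)) none

def pvSegTail (p : List (List Char)) : String :=
  if 1 < p.length then String.ofList (p.getLastD []) else ""

lemma pvA_eq (filename : String) (neglect_zip : Bool) :
    get_text_file_extension filename neglect_zip =
      pvTailA (if neglect_zip then pvStripZip filename [".gz", ".bz2", ".bgz"] else filename) := rfl

lemma pvB_eq (filename : String) (neglect_zip : Bool) :
    get_text_file_extension_alt filename neglect_zip =
      (if neglect_zip = true ∧ 1 < (List.splitOn '.' filename.toList).length ∧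
            ((List.splitOn '.' filename.toList).getLastD [] = "gz".toList ∨
             (List.splitOn '.' filename.toList).getLastD [] = "bz2".toList ∨
             (List.splitOn '.' filename.toList).getLastD [] = "bgz".toList)
       then pvSegTail ((List.splitOn '.' filename.toList).dropLast)
       else pvSegTail (List.splitOn '.' filename.toList)) := by
  unfold get_text_file_extension_alt pvSegTail
  by_cases h : neglect_zip = true ∧ 1 < (List.splitOn '.' filename.toList).length ∧
      ((List.splitOn '.' filename.toList).getLastD [] = "gz".toList ∨
       (List.splitOn '.' filename.toList).getLastD [] = "bz2".toList ∨
       (List.splitOn '.' filename.toList).getLastD [] = "bgz".toList)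
  · simp only [if_pos h]
  · simp only [if_neg h]

-- splitOn facts
lemma pvSplit_no_dot (cs : List Char) (h : '.' ∉ cs) :
    List.splitOn '.' cs = [cs] := by
  unfold List.splitOn
  exact List.splitOnP_eq_single _ _ (fun x hx => by
    simp only [beq_iff_eq]; rintro rfl; exact h hx)

lemma pvSplit_last (ys xs : List Char) (hxs : '.' ∉ xs) :
    List.splitOn '.' (ys ++ '.' :: xs) = List.splitOn '.' ys ++ [xs] := by
  unfold List.splitOn
  rw [List.splitOnP_append_cons _ _ _ _ (by simp)]
  rw [show List.splitOnP (· == '.') xs = [xs] from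
    List.splitOnP_eq_single _ _ (fun x hx => by
      simp only [beq_iff_eq]; rintro rfl; exact hxs hx)]

lemma pvSplit_ne_nil (cs : List Char) : List.splitOn '.' cs ≠ [] :=
  List.splitOnP_ne_nil _ _

-- equations of PySem.Chars.rfind.go
lemma pvGo_zero (cs sub : List Char) :
    PySem.Chars.rfind.go cs sub 0 = if sub.isPrefixOf cs then 0 else -1 := by
  simp [PySem.Chars.rfind.go]

lemma pvGo_succ (cs sub : List Char) (j : Nat) :
    PySem.Chars.rfind.go cs sub (j + 1) =
      if sub.isPrefixOf (cs.drop (j + 1)) then ((j : Int) + 1) else PySem.Chars.rfind.go cs sub j := by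
  simp [PySem.Chars.rfind.go]

lemma pvGo_neg_one (cs sub : List Char) (j : Nat)
    (h : ∀ i, i ≤ j → ¬ sub.isPrefixOf (cs.drop i) = true) :
    PySem.Chars.rfind.go cs sub j = -1 := by
  induction j with
  | zero =>
      have h0 := h 0 (le_refl 0)
      simp only [List.drop_zero] at h0
      rw [pvGo_zero, if_neg h0]
  | succ j ih =>
      rw [pvGo_succ, if_neg (h (j + 1) (le_refl _)), ih (fun i hi => h i (Nat.le_succ_of_le hi))]

lemma pvGo_eq (cs sub : List Char) (j k : Nat)
    (hpre : sub.isPrefixOf (cs.drop k) = true) (hkj : k ≤ j)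
    (hno : ∀ i, k < i → i ≤ j → ¬ sub.isPrefixOf (cs.drop i) = true) :
    PySem.Chars.rfind.go cs sub j = (k : Int) := by
  induction j with
  | zero =>
      have hk0 : k = 0 := Nat.le_zero.mp hkj
      subst hk0
      simp only [List.drop_zero] at hpre
      rw [pvGo_zero, if_pos hpre]
      simp
  | succ j ih =>
      rw [pvGo_succ]
      by_cases hk : k = j + 1
      · subst hk
        rw [if_pos hpre]
        push_cast
        ring
      · have hkj' : k ≤ j := Nat.lt_succ_iff.mp (Nat.lt_of_le_of_ne hkj hk)
        rw [if_neg (hno (j + 1) (Nat.lt_succ_of_le hkj') (le_refl _)),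
          ih hkj' (fun i h1 h2 => hno i h1 (Nat.le_succ_of_le h2))]

lemma pvRfind_eq_go (cs sub : List Char) :
    PySem.Chars.rfind cs sub = PySem.Chars.rfind.go cs sub cs.length := rfl

lemma pvDot_mem_of_prefix {l : List Char} (h : ['.'].isPrefixOf l = true) : '.' ∈ l := by
  have := List.isPrefixOf_iff_prefix.mp h
  exact this.subset (by simp)

lemma pvRfind_dot_none (cs : List Char) (h : '.' ∉ cs) :
    PySem.Chars.rfind cs ['.'] = -1 := by
  rw [pvRfind_eq_go]
  apply pvGo_neg_one
  intro i _ hpre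
  exact h (List.mem_of_mem_drop (pvDot_mem_of_prefix hpre))

lemma pvRfind_dot_last (ys xs : List Char) (hxs : '.' ∉ xs) :
    PySem.Chars.rfind (ys ++ '.' :: xs) ['.'] = (ys.length : Int) := by
  rw [pvRfind_eq_go]
  apply pvGo_eq
  · rw [List.drop_left]
    simp [List.isPrefixOf]
  · simp
  · intro i h1 h2 hpre
    obtain ⟨m, rfl⟩ : ∃ m, i = ys.length + (m + 1) := ⟨i - ys.length - 1, by omega⟩
    have hdrop : List.drop (ys.length + (m + 1)) (ys ++ '.' :: xs) = List.drop m xs := by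
      rw [List.drop_append, List.drop_eq_nil_of_le (by omega), List.nil_append]
      have hm1 : ys.length + (m + 1) - ys.length = m + 1 := by omega
      rw [hm1, List.drop_succ_cons]
    rw [hdrop] at hpre
    exact hxs (List.mem_of_mem_drop (pvDot_mem_of_prefix hpre))

lemma pvRfind_suffix (cs sub : List Char) (hne : sub ≠ []) (hsuf : sub <:+ cs) :
    PySem.Chars.rfind cs sub = ((cs.length - sub.length : Nat) : Int) := by
  obtain ⟨pre, rfl⟩ := hsuf
  rw [pvRfind_eq_go]
  have hlen : (pre ++ sub).length - sub.length = pre.length := by simp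
  rw [hlen]
  apply pvGo_eq
  · rw [List.drop_left]
    exact List.isPrefixOf_iff_prefix.mpr (List.prefix_refl _)
  · simp
  · intro i h1 h2 hpre
    have hle := (List.isPrefixOf_iff_prefix.mp hpre).length_le
    rw [List.length_drop] at hle
    simp at h2
    have : sub.length ≠ 0 := by simpa using hne
    omega

lemma pvExists_last_dot (cs : List Char) (h : '.' ∈ cs) :
    ∃ ys xs, cs = ys ++ '.' :: xs ∧ '.' ∉ xs := by
  induction cs with
  | nil => simp at h
  | cons c rest ih =>
      by_cases hr : '.' ∈ rest
      · obtain ⟨ys, xs, h1, h2⟩ := ih hr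
        exact ⟨c :: ys, xs, by simp [h1], h2⟩
      · have hc : c = '.' := by
          rcases List.mem_cons.mp h with h' | h'
          · exact h'.symm
          · exact absurd h' hr
        exact ⟨[], rest, by simp [hc], hr⟩

lemma pvLastSeg_unique (ys xs pre e : List Char) (hxs : '.' ∉ xs) (he : '.' ∉ e)
    (heq : ys ++ '.' :: xs = pre ++ '.' :: e) : xs = e := by
  have h1 := pvSplit_last ys xs hxs
  have h2 := pvSplit_last pre e he
  rw [heq, h2] at h1
  have := congrArg (fun t => t.getLastD ([] : List Char)) h1
  simpa [List.getLastD_concat] using this.symm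

lemma pvSuffix_iff (ys xs e : List Char) (hxs : '.' ∉ xs) (he : '.' ∉ e) :
    ('.' :: e) <:+ (ys ++ '.' :: xs) ↔ xs = e := by
  constructor
  · rintro ⟨pre, hpre⟩
    exact pvLastSeg_unique ys xs pre e hxs he hpre.symm
  · rintro rfl
    exact ⟨ys, rfl⟩

-- PySem.Str.endswith for a pattern starting with '.'
lemma pvEndswith_iff (s : String) (e : List Char) :
    PySem.Str.endswith s (String.ofList ('.' :: e)) = true ↔ ('.' :: e) <:+ s.toList := by
  rw [PySem.Str.endswith_eq, String.toList_ofList]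
  exact PySem.Chars.endswith_iff _ _

-- the tails agree on every string
lemma pvTail_eq (s : String) : pvTailA s = pvSegTail (List.splitOn '.' s.toList) := by
  unfold pvTailA pvSegTail
  by_cases hd : '.' ∈ s.toList
  · obtain ⟨ys, xs, hcs, hxs⟩ := pvExists_last_dot _ hd
    have hrf : PySem.Str.rfind s "." = (ys.length : Int) := by
      rw [PySem.Str.rfind_eq, show ".".toList = ['.'] from rfl, hcs, pvRfind_dot_last ys xs hxs]
    rw [hrf, hcs, pvSplit_last ys xs hxs]
    rw [if_neg (by omega : ¬((ys.length : Int) = -1))]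
    have hlen : 1 < (List.splitOn '.' ys ++ [xs]).length := by
      have := pvSplit_ne_nil ys
      have : 0 < (List.splitOn '.' ys).length := List.length_pos_of_ne_nil this
      simp only [List.length_append, List.length_cons, List.length_nil]
      omega
    rw [if_pos hlen, List.getLastD_concat]
    apply String.toList_inj.mp
    rw [PySem.Str.toList_slice, PySem.Chars.slice_eq_listSlice, String.toList_ofList]
    have h1 : (ys.length : Int) + 1 = ((ys.length + 1 : Nat) : Int) := by push_cast; ring
    rw [h1, PySem.List.slice_from_natCast, hcs]
    rw [List.drop_append, List.drop_eq_nil_of_le (by omega), List.nil_append]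
    have h3 : ys.length + 1 - ys.length = 1 := by omega
    rw [h3, List.drop_succ_cons, List.drop_zero]
  · have hrf : PySem.Str.rfind s "." = -1 := by
      rw [PySem.Str.rfind_eq, show ".".toList = ['.'] from rfl, pvRfind_dot_none _ hd]
    rw [hrf, pvSplit_no_dot _ hd]
    simp

lemma pvMain (filename : String) (neglect_zip : Bool) :
    get_text_file_extension filename neglect_zip = get_text_file_extension_alt filename neglect_zip := by
  rw [pvA_eq, pvB_eq]
  by_cases hd : '.' ∈ filename.toList
  · obtain ⟨ys, xs, hcs, hxs⟩ := pvExists_last_dot _ hd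
    have hsp : List.splitOn '.' filename.toList = List.splitOn '.' ys ++ [xs] := by
      rw [hcs]; exact pvSplit_last ys xs hxs
    have hlast : (List.splitOn '.' filename.toList).getLastD [] = xs := by
      rw [hsp, List.getLastD_concat]
    have hlen : 1 < (List.splitOn '.' filename.toList).length := by
      have := List.length_pos_of_ne_nil (pvSplit_ne_nil ys)
      rw [hsp]
      simp only [List.length_append, List.length_cons, List.length_nil]
      omega
    have hsuf : ∀ e : List Char, '.' ∉ e →
        (PySem.Str.endswith filename (String.ofList ('.' :: e)) = true ↔ xs = e) := by
      intro e he
      rw [pvEndswith_iff, hcs, pvSuffix_iff ys xs e hxs he]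
    have hgz : PySem.Str.endswith filename ".gz" = true ↔ xs = ['g', 'z'] :=
      hsuf ['g', 'z'] (by decide)
    have hbz2 : PySem.Str.endswith filename ".bz2" = true ↔ xs = ['b', 'z', '2'] :=
      hsuf ['b', 'z', '2'] (by decide)
    have hbgz : PySem.Str.endswith filename ".bgz" = true ↔ xs = ['b', 'g', 'z'] :=
      hsuf ['b', 'g', 'z'] (by decide)
    -- the stripped string, when a zip extension matches
    have hstrip : ∀ (E : String) (e : List Char), E = String.ofList ('.' :: e) → xs = e →
        (PySem.Str.slice filename (some 0) (some (PySem.Str.rfind filename E))).toList = ys := by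
      intro E e hEe hxe
      subst hEe
      have hsf : ('.' :: e) <:+ filename.toList := by
        rw [hcs, hxe]; exact ⟨ys, rfl⟩
      have hrf : PySem.Str.rfind filename (String.ofList ('.' :: e)) =
          ((filename.toList.length - ('.' :: e).length : Nat) : Int) := by
        rw [PySem.Str.rfind_eq, String.toList_ofList]
        exact pvRfind_suffix _ _ (by simp) hsf
      rw [hrf, PySem.Str.toList_slice, PySem.Chars.slice_eq_listSlice]
      have hne : filename.toList.length - ('.' :: e).length = ys.length := by
        rw [hcs, hxe]; simp
      rw [hne, PySem.List.slice_zero_start, PySem.List.slice_to_natCast, hcs, List.take_left]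
    have hdrop : (List.splitOn '.' filename.toList).dropLast = List.splitOn '.' ys := by
      rw [hsp, List.dropLast_concat]
    have hTailYs : ∀ s' : String, s'.toList = ys →
        pvTailA s' = pvSegTail ((List.splitOn '.' filename.toList).dropLast) := by
      intro s' hs'
      rw [pvTail_eq s', hs', hdrop]
    cases neglect_zip with
    | false =>
        rw [if_neg (by simp)]
        simp only [Bool.false_eq_true, if_false]
        exact pvTail_eq filename
    | true =>
        by_cases hm : xs = ['g', 'z'] ∨ xs = ['b', 'z', '2'] ∨ xs = ['b', 'g', 'z']
        · have hcond : (true = true ∧ 1 < (List.splitOn '.' filename.toList).length ∧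
              ((List.splitOn '.' filename.toList).getLastD [] = "gz".toList ∨
               (List.splitOn '.' filename.toList).getLastD [] = "bz2".toList ∨
               (List.splitOn '.' filename.toList).getLastD [] = "bgz".toList)) := by
            refine ⟨rfl, hlen, ?_⟩
            rw [hlast]
            simpa using hm
          rw [if_pos hcond, if_pos rfl]
          rcases hm with hm | hm | hm
          · have he1 : PySem.Str.endswith filename ".gz" = true := hgz.mpr hm
            have hstr : pvStripZip filename [".gz", ".bz2", ".bgz"] =
                PySem.Str.slice filename (some 0) (some (PySem.Str.rfind filename ".gz")) := by
              simp only [pvStripZip, he1, if_true]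
            rw [hstr]
            exact hTailYs _ (hstrip ".gz" ['g', 'z'] rfl hm)
          · have he1 : PySem.Str.endswith filename ".gz" = false := by
              rw [Bool.eq_false_iff]; intro hc; rw [hgz] at hc; rw [hm] at hc; simp at hc
            have he2 : PySem.Str.endswith filename ".bz2" = true := hbz2.mpr hm
            have hstr : pvStripZip filename [".gz", ".bz2", ".bgz"] =
                PySem.Str.slice filename (some 0) (some (PySem.Str.rfind filename ".bz2")) := by
              simp only [pvStripZip, he1, he2, if_true, Bool.false_eq_true, if_false]
            rw [hstr]
            exact hTailYs _ (hstrip ".bz2" ['b', 'z', '2'] rfl hm)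
          · have he1 : PySem.Str.endswith filename ".gz" = false := by
              rw [Bool.eq_false_iff]; intro hc; rw [hgz] at hc; rw [hm] at hc; simp at hc
            have he2 : PySem.Str.endswith filename ".bz2" = false := by
              rw [Bool.eq_false_iff]; intro hc; rw [hbz2] at hc; rw [hm] at hc; simp at hc
            have he3 : PySem.Str.endswith filename ".bgz" = true := hbgz.mpr hm
            have hstr : pvStripZip filename [".gz", ".bz2", ".bgz"] =
                PySem.Str.slice filename (some 0) (some (PySem.Str.rfind filename ".bgz")) := by
              simp only [pvStripZip, he1, he2, he3, if_true, Bool.false_eq_true, if_false]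
            rw [hstr]
            exact hTailYs _ (hstrip ".bgz" ['b', 'g', 'z'] rfl hm)
        · rw [not_or, not_or] at hm
          obtain ⟨hm1, hm2, hm3⟩ := hm
          have he1 : PySem.Str.endswith filename ".gz" = false := by
            rw [Bool.eq_false_iff]; intro hc; exact hm1 (hgz.mp hc)
          have he2 : PySem.Str.endswith filename ".bz2" = false := by
            rw [Bool.eq_false_iff]; intro hc; exact hm2 (hbz2.mp hc)
          have he3 : PySem.Str.endswith filename ".bgz" = false := by
            rw [Bool.eq_false_iff]; intro hc; exact hm3 (hbgz.mp hc)
          have hstr : pvStripZip filename [".gz", ".bz2", ".bgz"] = filename := by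
            simp only [pvStripZip, he1, he2, he3, Bool.false_eq_true, if_false]
          have hcond : ¬ (true = true ∧ 1 < (List.splitOn '.' filename.toList).length ∧
              ((List.splitOn '.' filename.toList).getLastD [] = "gz".toList ∨
               (List.splitOn '.' filename.toList).getLastD [] = "bz2".toList ∨
               (List.splitOn '.' filename.toList).getLastD [] = "bgz".toList)) := by
            rw [hlast]
            rintro ⟨-, -, h | h | h⟩ <;> simp_all
          rw [if_neg hcond, if_pos rfl, hstr]
          exact pvTail_eq filename
  · have hsp : List.splitOn '.' filename.toList = [filename.toList] := pvSplit_no_dot _ hd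
    have hnosuf : ∀ e : List Char, PySem.Str.endswith filename (String.ofList ('.' :: e)) = false := by
      intro e
      rw [Bool.eq_false_iff]
      intro hc
      exact hd (((pvEndswith_iff filename e).mp hc).subset (by simp))
    have he1 : PySem.Str.endswith filename ".gz" = false := hnosuf ['g', 'z']
    have he2 : PySem.Str.endswith filename ".bz2" = false := hnosuf ['b', 'z', '2']
    have he3 : PySem.Str.endswith filename ".bgz" = false := hnosuf ['b', 'g', 'z']
    have hstr : pvStripZip filename [".gz", ".bz2", ".bgz"] = filename := by
      simp only [pvStripZip, he1, he2, he3, Bool.false_eq_true, if_false]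
    have hcond : ¬ (neglect_zip = true ∧ 1 < (List.splitOn '.' filename.toList).length ∧
        ((List.splitOn '.' filename.toList).getLastD [] = "gz".toList ∨
         (List.splitOn '.' filename.toList).getLastD [] = "bz2".toList ∨
         (List.splitOn '.' filename.toList).getLastD [] = "bgz".toList)) := by
      rw [hsp]
      rintro ⟨-, h, -⟩
      simp at h
    rw [if_neg hcond]
    cases neglect_zip with
    | false =>
        simp only [Bool.false_eq_true]
        exact pvTail_eq filename
    | true =>
        rw [if_pos rfl, hstr]
        exact pvTail_eq filename

-- ===== VERDICT (by name: the statement is the Claim_ definition above) =====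
theorem get_text_file_extension_spec : Claim_equal_get_text_file_extension := by
  intro filename neglect_zip _
  exact pvMain filename neglect_zip
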